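-- pv_equiv track=rewrite | github.com/TianboZ/leetcodePy | problems/expressive_words.py | check
-- ===== SOURCE A (Python) =====
-- def check(w1, w2)->bool:
--   i = 0
--   j = 0
--   while i < len(w1) and j < len(w2):
--     c1 = w1[i]
--     c2 = w2[j]
--     if c1 != c2:
--       return False
--
--     # find continues same char of w1
--     m = i + 1
--     while m < len(w1) and w1[m] == c1:
--       m += 1
--     size1 = m - i
--
--     n = j + 1
--     while n < len(w2) and w2[n] == c1:
--       n += 1
--     size2 = n - j
--
--     # compare size1 and size2
--     if size1 > size2 and size1 < 3:
--       return False
--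
--     if size2 > size1:
--       return False
--
--     # increment i, j
--     i = m
--     j = n
--
--   return i == len(w1) and j == len(w2)
-- ===== SOURCE B (Python) =====
-- def check(w1, w2) -> bool:
--     def rle(s):
--         groups = []
--         while s:
--             c = s[0]
--             rest = s.lstrip(c)
--             groups.append((c, len(s) - len(rest)))
--             s = rest
--         return groups
--     g1 = rle(w1)
--     g2 = rle(w2)
--     if len(g1) != len(g2):
--         return False
--     for (c1, s1), (c2, s2) in zip(g1, g2):
--         if c1 != c2:
--             return False
--         if s1 > s2 and s1 < 3:
--             return False
--         if s2 > s1: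
--             return False
--     return True
-- ===== Notes on version B (the rewrite author's own statement) =====
-- stated objective: alternative
-- what changed: Replaced A's interleaved two-pointer scan (with nested run-finding while loops) by run-length encoding both strings once and then comparing the two group tables pairwise with the same size rules.
import Mathlib
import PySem

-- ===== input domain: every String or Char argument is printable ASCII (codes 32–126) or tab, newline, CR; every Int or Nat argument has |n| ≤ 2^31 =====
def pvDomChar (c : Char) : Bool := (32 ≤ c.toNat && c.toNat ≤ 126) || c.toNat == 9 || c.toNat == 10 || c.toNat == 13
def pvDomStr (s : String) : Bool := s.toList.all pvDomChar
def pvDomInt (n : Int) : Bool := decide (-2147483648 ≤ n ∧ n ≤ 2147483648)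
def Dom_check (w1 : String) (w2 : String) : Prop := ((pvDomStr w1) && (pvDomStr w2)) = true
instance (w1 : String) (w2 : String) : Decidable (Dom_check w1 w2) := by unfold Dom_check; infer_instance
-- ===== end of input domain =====

-- B replaces A's interleaved two-pointer scan by run-length encoding both strings once and
-- comparing the group tables pairwise (objective: alternative decomposition, same cost).

-- ===== PORT A =====
-- inner while loop: advance m while m < len(l) and l[m] == c
def runEnd (l : List Char) (c : Char) (m : Nat) : Nat :=
  if h : m < l.length ∧ l.getD m ' ' == c then runEnd l c (m + 1) else m
termination_by l.length - m
decreasing_by omega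

theorem runEnd_ge (l : List Char) (c : Char) (m : Nat) : m ≤ runEnd l c m := by
  fun_induction runEnd <;> omega

-- outer while loop of A over indices i, j
def checkLoop (l1 l2 : List Char) (i j : Nat) : Bool :=
  if h : i < l1.length ∧ j < l2.length then
    -- c1 = w1[i], c2 = w2[j]; Python's locals c1, c2, m, n, size1, size2 are inlined below
    if l1.getD i ' ' != l2.getD j ' ' then false
    else
      -- size1 = m - i and size2 = n - j, with m = runEnd of w1 from i+1 and n = runEnd of w2 from j+1 (both scans use c1)
      if (runEnd l1 (l1.getD i ' ') (i + 1) - i > runEnd l2 (l1.getD i ' ') (j + 1) - j)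
         && (runEnd l1 (l1.getD i ' ') (i + 1) - i < 3) then false
      else if runEnd l2 (l1.getD i ' ') (j + 1) - j > runEnd l1 (l1.getD i ' ') (i + 1) - i then false
      else checkLoop l1 l2 (runEnd l1 (l1.getD i ' ') (i + 1)) (runEnd l2 (l1.getD i ' ') (j + 1))
  else decide (i = l1.length) && decide (j = l2.length)
termination_by l1.length - i
decreasing_by have := runEnd_ge l1 (l1.getD i ' ') (i + 1); omega

def check (w1 : String) (w2 : String) : Bool := checkLoop w1.toList w2.toList 0 0

-- ===== PORT B =====
-- rle: while s: c = s[0]; rest = s.lstrip(c); append (c, len(s)-len(rest)); s = rest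
-- (lstrip with a single-char argument is exactly dropWhile (· == c))
def rleGo (s : List Char) : List (Char × Nat) :=
  match s with
  | [] => []
  | c :: t =>
    let rest := (c :: t).dropWhile (· == c)
    (c, (c :: t).length - rest.length) :: rleGo rest
termination_by s.length
decreasing_by
  simp only [List.dropWhile, BEq.rfl]
  exact Nat.lt_succ_of_le (List.length_dropWhile_le _ t)

-- the body of B's zip loop
def groupOk (p : (Char × Nat) × (Char × Nat)) : Bool :=
  if p.1.1 != p.2.1 then false
  else if p.1.2 > p.2.2 && p.1.2 < 3 then false
  else if p.2.2 > p.1.2 then false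
  else true

def check_alt (w1 : String) (w2 : String) : Bool :=
  let g1 := rleGo w1.toList
  let g2 := rleGo w2.toList
  if g1.length ≠ g2.length then false
  else (g1.zip g2).all groupOk

-- ===== PRECONDITION & SPEC =====
def Spec_check (w1 : String) (w2 : String) (out : Bool) : Prop := out = check_alt w1 w2
instance (w1 : String) (w2 : String) (out : Bool) : Decidable (Spec_check w1 w2 out) := by unfold Spec_check; infer_instance

-- ===== CLAIM (what is proved, stated in full; the proofs are below) =====
def Claim_equal_check : Prop := ∀ (w1 : String) (w2 : String), Dom_check w1 w2 → Spec_check w1 w2 (check w1 w2)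

-- ===== LEMMAS AND PROOFS =====

-- proof-side pairwise comparison of group tables
def cmpG : List (Char × Nat) → List (Char × Nat) → Bool
  | [], [] => true
  | [], _ :: _ => false
  | _ :: _, [] => false
  | g :: t1, h :: t2 => groupOk (g, h) && cmpG t1 t2

theorem cmpG_eq (g1 g2 : List (Char × Nat)) :
    cmpG g1 g2 = (decide (g1.length = g2.length) && (g1.zip g2).all groupOk) := by
  induction g1 generalizing g2 with
  | nil => cases g2 <;> simp [cmpG]
  | cons g t1 ih =>
    cases g2 with
    | nil => simp [cmpG]
    | cons h t2 =>
      simp [cmpG, ih t2, List.all_cons]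
      by_cases hh : groupOk (g, h) = true <;> simp [hh]

theorem dropWhile_eq_drop (p : Char → Bool) (l : List Char) :
    l.dropWhile p = l.drop (l.takeWhile p).length := by
  induction l with
  | nil => rfl
  | cons c t ih => by_cases h : p c <;> simp [List.dropWhile, List.takeWhile, h, ih]

theorem rleGo_cons (c : Char) (t : List Char) :
    rleGo (c :: t) = (c, (t.takeWhile (· == c)).length + 1) :: rleGo (t.dropWhile (· == c)) := by
  have hlen : (t.takeWhile (· == c)).length + (t.dropWhile (· == c)).length = t.length := by
    rw [← List.length_append, List.takeWhile_append_dropWhile]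
  rw [rleGo]
  simp only [List.dropWhile, BEq.rfl, List.length_cons]
  congr 1
  congr 1
  omega

theorem runEnd_eq (l : List Char) (c : Char) (m : Nat) :
    runEnd l c m = m + ((l.drop m).takeWhile (· == c)).length := by
  fun_induction runEnd with
  | case1 m h ih =>
    obtain ⟨hm, hc⟩ := h
    rw [ih, List.drop_eq_getElem_cons hm]
    rw [List.getD_eq_getElem l ' ' hm] at hc
    simp [List.takeWhile, hc]
    omega
  | case2 m h =>
    by_cases hm : m < l.length
    · have hc : ¬ (l.getD m ' ' == c) = true := by tauto
      rw [List.drop_eq_getElem_cons hm]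
      rw [List.getD_eq_getElem l ' ' hm] at hc
      simp [List.takeWhile, hc]
    · rw [List.drop_eq_nil_of_le (by omega)]
      simp [List.takeWhile]

theorem takeWhile_length_le (p : Char → Bool) (l : List Char) :
    (l.takeWhile p).length ≤ l.length := by
  have := congrArg List.length (List.takeWhile_append_dropWhile (p := p) (l := l))
  rw [List.length_append] at this
  omega

theorem exit_eq (l1 l2 : List Char) (i j : Nat) (hi : i ≤ l1.length) (hj : j ≤ l2.length)
    (h : ¬ (i < l1.length ∧ j < l2.length)) :
    (decide (i = l1.length) && decide (j = l2.length))
      = cmpG (rleGo (l1.drop i)) (rleGo (l2.drop j)) := by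
  by_cases h1 : i = l1.length <;> by_cases h2 : j = l2.length
  · subst h1; subst h2; rw [List.drop_length, List.drop_length]; simp [rleGo, cmpG]
  · subst h1
    have hj' : j < l2.length := by omega
    rw [List.drop_length, List.drop_eq_getElem_cons hj', rleGo_cons]
    simp [rleGo, cmpG, h2]
  · subst h2
    have hi' : i < l1.length := by omega
    rw [List.drop_length, List.drop_eq_getElem_cons hi', rleGo_cons]
    simp [rleGo, cmpG, h1]
  · exact absurd ⟨by omega, by omega⟩ h

theorem loop_eq (l1 l2 : List Char) :
    ∀ k i j, l1.length - i ≤ k → i ≤ l1.length → j ≤ l2.length →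
      checkLoop l1 l2 i j = cmpG (rleGo (l1.drop i)) (rleGo (l2.drop j)) := by
  intro k
  induction k with
  | zero =>
    intro i j hk hi hj
    rw [checkLoop, dif_neg (by omega)]
    exact exit_eq l1 l2 i j hi hj (by omega)
  | succ k ih =>
    intro i j hk hi hj
    rw [checkLoop]
    by_cases h : i < l1.length ∧ j < l2.length
    case neg =>
      rw [dif_neg h]
      exact exit_eq l1 l2 i j hi hj h
    case pos =>
      obtain ⟨h1, h2⟩ := h
      rw [dif_pos ⟨h1, h2⟩]
      have hg1 : l1[i] = l1.getD i ' ' := (List.getD_eq_getElem l1 ' ' h1).symm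
      have hg2 : l2[j] = l2.getD j ' ' := (List.getD_eq_getElem l2 ' ' h2).symm
      rw [List.drop_eq_getElem_cons h1, List.drop_eq_getElem_cons h2, rleGo_cons, rleGo_cons,
        hg1, hg2]
      by_cases hcc : l1.getD i ' ' = l2.getD j ' '
      case neg =>
        have hcc' : ¬ l1[i]?.getD ' ' = l2[j]?.getD ' ' := hcc
        rw [if_pos (bne_iff_ne.mpr hcc)]
        simp [cmpG, groupOk, bne, hcc']
      case pos =>
        rw [← hcc]
        rw [if_neg (by simp)]
        rw [runEnd_eq l1 (l1.getD i ' ') (i + 1), runEnd_eq l2 (l1.getD i ' ') (j + 1)]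
        set a := ((l1.drop (i + 1)).takeWhile (· == l1.getD i ' ')).length with ha
        set b := ((l2.drop (j + 1)).takeWhile (· == l1.getD i ' ')).length with hb
        have ea : i + 1 + a - i = a + 1 := by omega
        have eb : j + 1 + b - j = b + 1 := by omega
        rw [ea, eb]
        have hrec : checkLoop l1 l2 (i + 1 + a) (j + 1 + b)
            = cmpG (rleGo (l1.drop (i + 1 + a))) (rleGo (l2.drop (j + 1 + b))) := by
          have la := takeWhile_length_le (· == l1.getD i ' ') (l1.drop (i + 1))
          have lb := takeWhile_length_le (· == l1.getD i ' ') (l2.drop (j + 1))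
          rw [← ha] at la
          rw [← hb] at lb
          rw [List.length_drop] at la lb
          apply ih <;> omega
        rw [hrec]
        have hdm : l1.drop (i + 1 + a) = (l1.drop (i + 1)).dropWhile (· == l1.getD i ' ') := by
          rw [dropWhile_eq_drop, ← ha, List.drop_drop]
        have hdn : l2.drop (j + 1 + b) = (l2.drop (j + 1)).dropWhile (· == l1.getD i ' ') := by
          rw [dropWhile_eq_drop, ← hb, List.drop_drop]
        rw [hdm, hdn]
        simp only [cmpG, groupOk, bne_self_eq_false, Bool.false_eq_true, if_false]
        by_cases hb1 : a + 1 > b + 1 ∧ a + 1 < 3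
        · simp [hb1.1, hb1.2]
        · by_cases hb2 : b + 1 > a + 1
          · have hn3 : ¬ (a + 1 > b + 1) := by omega
            simp [hb2, hn3]
          · have e1 : (decide (a + 1 > b + 1) && decide (a + 1 < 3)) = false := by
              by_cases h3 : a + 1 > b + 1
              · have h4 : ¬ (a + 1 < 3) := fun hh => hb1 ⟨h3, hh⟩
                simp [h4]
              · simp [h3]
            have e2 : decide (b + 1 > a + 1) = false := by simpa using hb2
            simp only [gt_iff_lt] at e1 e2
            simp [Bool.and_assoc]

-- ===== VERDICT (by name: the statement is the Claim_ definition above) =====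
theorem check_spec : Claim_equal_check := by
  intro w1 w2 _
  unfold Spec_check check check_alt
  rw [loop_eq w1.toList w2.toList w1.toList.length 0 0 (by omega) (by omega) (by omega)]
  simp only [List.drop_zero]
  rw [cmpG_eq]
  by_cases h : (rleGo w1.toList).length = (rleGo w2.toList).length <;> simp [h]
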